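-- pv_equiv track=rewrite | github.com/sys-bio/AMAS | AMAS/iterator.py | getDictMatchByItem
-- ===== SOURCE A (Python) =====
-- import itertools
--
-- def getDictMatchByItem(
--                        chebi2ref_formula,
--                        spec2pred_formula):
--   """
--   Get match between two keys,
--   where there are exactly
--   one matching items.
--   If all items are matched by 1-1
--   (i.e., one species - one chebi),
--   return the fully matched dictionary.
--   (i.e., improve precision)
--   If neither, return None.
--   (i.e., nothing to update)
--
--   Parameters
--   ----------
--   chebi2ref_formula: dict
--       {chebi_term: a_species_formula(string)}
--   spec2pred_formula: dict
--       {species_id: [predicted_formulas]}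
--
--   Returns
--   -------
--   dict/None
--       {species_id: [chebi_term]}
--   """
--   match_dict = {one_k:[spec_id for spec_id in spec2pred_formula.keys() \
--                        if chebi2ref_formula[one_k] in spec2pred_formula[spec_id]
--                       ] \
--                 for one_k in chebi2ref_formula.keys()}
--   unmatched_species = [val for val in spec2pred_formula.keys() \
--                       if val not in list(itertools.chain(*match_dict.values()))]
--   unmatched_chebi = [val for val in match_dict.keys() if not match_dict[val]]
--   if len(unmatched_species) == 1 and len(unmatched_chebi) == 1:
--     return {unmatched_species[0]: unmatched_chebi}
--   # reverse match_dict into the proper return format.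
--   elif all([len(val[1])==1 for val in list(match_dict.items())]):
--     return {match_dict[k][0]: [k] for k in match_dict.keys()}
--   else:
--     return None
-- ===== SOURCE B (Python) =====
-- def getDictMatchByItem(chebi2ref_formula, spec2pred_formula):
--   # Reverse index: reference formula -> chebi terms having it.
--   formula_to_chebis = {}
--   for chebi, formula in chebi2ref_formula.items():
--     formula_to_chebis.setdefault(formula, []).append(chebi)
--   # One pass over species; every chebi key starts present (empty list).
--   match_dict = {chebi: [] for chebi in chebi2ref_formula}
--   matched_species = set()
--   for spec_id, formulas in spec2pred_formula.items():
--     hit = set()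
--     for formula in formulas:
--       for chebi in formula_to_chebis.get(formula, []):
--         if chebi not in hit:
--           hit.add(chebi)
--           match_dict[chebi].append(spec_id)
--     if hit:
--       matched_species.add(spec_id)
--   unmatched_species = [s for s in spec2pred_formula if s not in matched_species]
--   unmatched_chebi = [c for c in match_dict if not match_dict[c]]
--   if len(unmatched_species) == 1 and len(unmatched_chebi) == 1:
--     return {unmatched_species[0]: unmatched_chebi}
--   elif all(len(v) == 1 for v in match_dict.values()):
--     return {v[0]: [k] for k, v in match_dict.items()}
--   else:
--     return None
-- ===== Notes on version B (the rewrite author's own statement) =====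
-- stated objective: faster
-- what changed: A rescans all species once per chebi term (and re-flattens match_dict.values() inside the unmatched-species comprehension, making that step quadratic); B builds a reverse index formula->chebi terms once and makes a single pass over the species' predicted formulas, appending each species to its matching chebi entries with a per-species seen-set, and collects matched species on the fly instead of flattening match_dict.values().
import Mathlib
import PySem

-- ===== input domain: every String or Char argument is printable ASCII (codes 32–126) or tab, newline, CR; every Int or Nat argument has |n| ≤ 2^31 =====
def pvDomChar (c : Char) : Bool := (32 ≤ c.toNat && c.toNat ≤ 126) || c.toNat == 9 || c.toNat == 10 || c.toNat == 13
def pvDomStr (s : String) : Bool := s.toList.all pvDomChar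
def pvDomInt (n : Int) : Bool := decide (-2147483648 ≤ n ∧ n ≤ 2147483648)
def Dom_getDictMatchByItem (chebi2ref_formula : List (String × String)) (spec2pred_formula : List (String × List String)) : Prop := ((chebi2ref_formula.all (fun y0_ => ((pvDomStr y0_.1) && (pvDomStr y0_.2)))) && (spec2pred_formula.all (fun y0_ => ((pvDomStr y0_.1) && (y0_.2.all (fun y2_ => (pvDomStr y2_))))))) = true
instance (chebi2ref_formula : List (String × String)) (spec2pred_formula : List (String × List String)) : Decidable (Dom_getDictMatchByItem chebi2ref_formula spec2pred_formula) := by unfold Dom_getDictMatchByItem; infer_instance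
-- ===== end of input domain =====

-- B replaces A's chebi-by-species rescanning with a reverse index (formula -> chebi terms) and a
-- single pass over the species' predicted formulas (objective: faster; measured faster in a timing run).

-- ===== PORT A =====
-- A's dict comprehension {one_k: [spec_id for spec_id in keys if chebi2ref[one_k] in spec2pred[spec_id]]}.
def aMatch (cd : PySem.Dict String String) (sd : PySem.Dict String (List String)) :
    PySem.Dict String (List String) :=
  PySem.Dict.ofList (cd.keys.map (fun one_k =>
    (one_k, sd.keys.filter (fun spec_id => (sd.getD spec_id []).contains (cd.getD one_k "")))))

def getDictMatchByItem (chebi2ref_formula : List (String × String)) (spec2pred_formula : List (String × List String)) : Option (List (String × List String)) :=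
  let cd := PySem.Dict.ofList chebi2ref_formula
  let sd := PySem.Dict.ofList spec2pred_formula
  let match_dict := aMatch cd sd
  let unmatched_species := sd.keys.filter (fun v => !((match_dict.values.flatten).contains v))
  let unmatched_chebi := match_dict.keys.filter (fun v => (match_dict.getD v []).isEmpty)
  if unmatched_species.length = 1 ∧ unmatched_chebi.length = 1 then
    some [(unmatched_species.headD "", unmatched_chebi)]
  else if match_dict.items.all (fun val => val.2.length == 1) then
    some ((match_dict.keys.foldl (fun d k => d.insert ((match_dict.getD k []).headD "") [k]) PySem.Dict.empty).items)
  else none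

-- ===== PORT B =====
-- reverse index: reference formula -> chebi terms having it (dict.setdefault(...).append).
def bIndex (cd : PySem.Dict String String) : PySem.Dict String (List String) :=
  cd.items.foldl (fun d p => d.modify p.2 [] (fun l => l ++ [p.1])) PySem.Dict.empty

-- inner body: `if chebi not in hit: hit.add(chebi); match_dict[chebi].append(spec_id)`.
def bStep2 (sp : String) (st2 : PySem.Dict String (List String) × List String) (ch : String) :
    PySem.Dict String (List String) × List String :=
  if st2.2.contains ch then st2
  else (st2.1.modify ch [] (fun l => l ++ [sp]), PySem.Set.add st2.2 ch)

-- one species: walk its formulas through the index, then record whether it was matched at all.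
def bStep (f2c : PySem.Dict String (List String))
    (acc : PySem.Dict String (List String) × List String) (kv : String × List String) :
    PySem.Dict String (List String) × List String :=
  let st := kv.2.foldl (fun st f => (f2c.getD f []).foldl (bStep2 kv.1) st) (acc.1, ([] : List String))
  (st.1, if st.2.isEmpty then acc.2 else PySem.Set.add acc.2 kv.1)

def getDictMatchByItem_alt (chebi2ref_formula : List (String × String)) (spec2pred_formula : List (String × List String)) : Option (List (String × List String)) :=
  let cd := PySem.Dict.ofList chebi2ref_formula
  let sd := PySem.Dict.ofList spec2pred_formula
  let f2c := bIndex cd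
  let init := PySem.Dict.ofList (cd.keys.map (fun k => (k, ([] : List String))))
  let res := sd.items.foldl (bStep f2c) (init, ([] : List String))
  let md := res.1
  let unmatched_species := sd.keys.filter (fun sp => !(res.2.contains sp))
  let unmatched_chebi := md.keys.filter (fun ch => (md.getD ch []).isEmpty)
  if unmatched_species.length = 1 ∧ unmatched_chebi.length = 1 then
    some [(unmatched_species.headD "", unmatched_chebi)]
  else if md.items.all (fun kv => kv.2.length == 1) then
    some ((md.items.foldl (fun d kv => d.insert (kv.2.headD "") [kv.1]) PySem.Dict.empty).items)
  else none

-- ===== PRECONDITION & SPEC =====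
def Spec_getDictMatchByItem (chebi2ref_formula : List (String × String)) (spec2pred_formula : List (String × List String)) (out : Option (List (String × List String))) : Prop := out = getDictMatchByItem_alt chebi2ref_formula spec2pred_formula
instance (chebi2ref_formula : List (String × String)) (spec2pred_formula : List (String × List String)) (out : Option (List (String × List String))) : Decidable (Spec_getDictMatchByItem chebi2ref_formula spec2pred_formula out) := by unfold Spec_getDictMatchByItem; infer_instance

-- ===== CLAIM (what is proved, stated in full; the proofs are below) =====
def Claim_equal_getDictMatchByItem : Prop := ∀ (chebi2ref_formula : List (String × String)) (spec2pred_formula : List (String × List String)), Dom_getDictMatchByItem chebi2ref_formula spec2pred_formula → Spec_getDictMatchByItem chebi2ref_formula spec2pred_formula (getDictMatchByItem chebi2ref_formula spec2pred_formula)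

-- ===== LEMMAS AND PROOFS =====

-- Dict.ofList of a list whose keys are already distinct keeps the items list as given.
lemma ofList_items_of_nodup {α : Type} (l : List (String × α)) (h : (l.map (·.1)).Nodup) :
    (PySem.Dict.ofList l).items = l := by
  have := PySem.Dict.items_foldl_insert_fresh (d := (PySem.Dict.empty : PySem.Dict String α))
    (l := l) (k := fun p => p.1) (v := fun p => p.2)
    (by intro a _; exact PySem.Dict.contains_empty _) (by simpa using h)
  simpa [PySem.Dict.ofList, PySem.Dict.update] using this

-- membership in the reverse index: x is listed under formula f iff (x, f) is a chebi item
lemma mem_bIndex (cd : PySem.Dict String String) (f x : String) :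
    x ∈ (bIndex cd).getD f [] ↔ (x, f) ∈ cd.items := by
  have hfold : bIndex cd = (cd.items.map (fun p => (p.2, p.1))).foldl
      (fun d p => d.modify p.1 [] (fun l => l ++ [p.2])) PySem.Dict.empty := by
    rw [List.foldl_map]; rfl
  rw [hfold, PySem.Dict.getD_foldl_modify_append]
  simp only [PySem.Dict.getD_empty, List.nil_append, List.mem_map, List.mem_filter,
    List.mem_map, beq_iff_eq]
  constructor
  · rintro ⟨q, ⟨⟨⟨a, b⟩, hp, rfl⟩, h2⟩, rfl⟩; simp at h2; subst h2; exact hp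
  · intro h; exact ⟨(f, x), ⟨⟨(x, f), h, rfl⟩, by simp⟩, rfl⟩

-- the inner fold over one species' chebi hits, with the seen-set guard
lemma inner_fold (sp : String) (chs : List String) (d : PySem.Dict String (List String))
    (seen : List String) (hk : ∀ ch ∈ chs, ch ∈ d.keys) :
    ((chs.foldl (bStep2 sp) (d, seen)).1.keys = d.keys) ∧
    (∀ x, x ∈ (chs.foldl (bStep2 sp) (d, seen)).2 ↔ x ∈ seen ∨ x ∈ chs) ∧
    (∀ x, (chs.foldl (bStep2 sp) (d, seen)).1.getD x [] =
      if x ∈ chs ∧ x ∉ seen then d.getD x [] ++ [sp] else d.getD x []) := by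
  induction chs generalizing d seen with
  | nil => simp
  | cons ch rest ih =>
    simp only [List.foldl_cons]
    by_cases hc : ch ∈ seen
    · have hb : bStep2 sp (d, seen) ch = (d, seen) := by
        simp [bStep2, hc]
      rw [hb]
      obtain ⟨h1, h2, h3⟩ := ih d seen (fun c hcm => hk c (by simp [hcm]))
      refine ⟨h1, fun x => ?_, fun x => ?_⟩
      · rw [h2]
        constructor
        · rintro (h | h)
          · exact Or.inl h
          · exact Or.inr (List.mem_cons_of_mem _ h)
        · rintro (h | h)
          · exact Or.inl h
          rcases List.mem_cons.mp h with rfl | h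
          · exact Or.inl hc
          · exact Or.inr h
      · rw [h3 x]
        by_cases hx : x = ch
        · subst hx; simp [hc]
        · simp [List.mem_cons, hx]
    · have hb : bStep2 sp (d, seen) ch =
          (d.modify ch [] (fun l => l ++ [sp]), PySem.Set.add seen ch) := by
        simp [bStep2, hc]
      rw [hb]
      have hchk : ch ∈ d.keys := hk ch (by simp)
      have hkeys : (d.modify ch [] (fun l => l ++ [sp])).keys = d.keys := by
        rw [PySem.Dict.keys_modify]
        exact PySem.Dict.keys_insert_of_contains _ _ ((PySem.Dict.contains_iff_mem_keys _ _).mpr hchk)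
      obtain ⟨h1, h2, h3⟩ := ih (d.modify ch [] (fun l => l ++ [sp])) (PySem.Set.add seen ch)
        (fun c hcm => by rw [hkeys]; exact hk c (by simp [hcm]))
      refine ⟨h1.trans hkeys, fun x => ?_, fun x => ?_⟩
      · rw [h2, PySem.Set.mem_add]
        constructor
        · rintro ((h | rfl) | h)
          · exact Or.inl h
          · exact Or.inr List.mem_cons_self
          · exact Or.inr (List.mem_cons_of_mem _ h)
        · rintro (h | h)
          · exact Or.inl (Or.inl h)
          · rcases List.mem_cons.mp h with rfl | h
            · exact Or.inl (Or.inr rfl)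
            · exact Or.inr h
      · rw [h3 x, PySem.Dict.getD_modify]
        by_cases hx : x = ch
        · subst hx
          simp [hc]
        · simp only [PySem.Set.mem_add, hx]
          by_cases hxr : x ∈ rest <;> by_cases hxs : x ∈ seen <;>
            simp [hxr, hxs, hx, List.mem_cons]

-- the outer fold over the species items
lemma outer_fold (f2c : PySem.Dict String (List String)) (cd : PySem.Dict String String)
    (hf2c : ∀ f x, x ∈ f2c.getD f [] → x ∈ cd.keys)
    (S : List (String × List String)) (d : PySem.Dict String (List String)) (m : List String)
    (hd : d.keys = cd.keys) :
    ((S.foldl (bStep f2c) (d, m)).1.keys = d.keys) ∧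
    (∀ x, (S.foldl (bStep f2c) (d, m)).1.getD x [] =
      d.getD x [] ++ (S.filter (fun kv => decide (x ∈ kv.2.flatMap (fun f => f2c.getD f [])))).map (·.1)) ∧
    (∀ x, x ∈ (S.foldl (bStep f2c) (d, m)).2 ↔
      x ∈ m ∨ ∃ kv ∈ S, kv.1 = x ∧ kv.2.flatMap (fun f => f2c.getD f []) ≠ []) := by
  induction S generalizing d m with
  | nil => simp
  | cons kv S' ih =>
    set chs := kv.2.flatMap (fun f => f2c.getD f []) with hchs
    have hb : bStep f2c (d, m) kv =
        ((chs.foldl (bStep2 kv.1) (d, [])).1,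
          if (chs.foldl (bStep2 kv.1) (d, [])).2.isEmpty then m else PySem.Set.add m kv.1) := by
      simp only [bStep, hchs]
      rw [List.foldl_flatMap]
    have hk : ∀ ch ∈ chs, ch ∈ d.keys := by
      intro ch hch
      rw [hd]
      rcases List.mem_flatMap.mp hch with ⟨f, _, hcf⟩
      exact hf2c f ch hcf
    obtain ⟨i1, i2, i3⟩ := inner_fold kv.1 chs d [] hk
    set st := chs.foldl (bStep2 kv.1) (d, ([] : List String)) with hst
    have hempty : st.2.isEmpty = true ↔ chs = [] := by
      rw [List.isEmpty_iff]
      constructor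
      · intro h
        refine List.eq_nil_iff_forall_not_mem.mpr (fun x hx => ?_)
        have := (i2 x).mpr (Or.inr hx)
        simp [h] at this
      · intro h
        refine List.eq_nil_iff_forall_not_mem.mpr (fun x hx => ?_)
        have := (i2 x).mp hx
        simp [h] at this
    simp only [List.foldl_cons, hb]
    obtain ⟨o1, o2, o3⟩ := ih st.1
      (if st.2.isEmpty then m else PySem.Set.add m kv.1) (i1.trans hd)
    refine ⟨o1.trans i1, fun x => ?_, fun x => ?_⟩
    · have i3' : st.1.getD x [] =
          if x ∈ chs then d.getD x [] ++ [kv.1] else d.getD x [] := by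
        rw [i3]; simp
      rw [o2 x, i3', List.filter_cons]
      by_cases hx : x ∈ chs
      · rw [if_pos hx, if_pos (decide_eq_true hx)]
        simp [List.append_assoc]
      · rw [if_neg hx, if_neg (by simpa [hchs, List.mem_flatMap] using hx)]
    · rw [o3 x]
      by_cases hc : chs = []
      · have : st.2.isEmpty = true := hempty.mpr hc
        simp only [this]

        constructor
        · rintro (h | ⟨kv', h1, h2, h3⟩)
          · exact Or.inl h
          · exact Or.inr ⟨kv', List.mem_cons_of_mem _ h1, h2, h3⟩
        · rintro (h | ⟨kv', h1, h2, h3⟩)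
          · exact Or.inl h
          · rcases List.mem_cons.mp h1 with rfl | h1
            · exact absurd hc h3
            · exact Or.inr ⟨kv', h1, h2, h3⟩
      · have hf : st.2.isEmpty = false :=
          Bool.eq_false_iff.mpr (fun h => hc (hempty.mp h))
        simp only [hf, Bool.false_eq_true, if_false]
        rw [PySem.Set.mem_add]
        constructor
        · rintro ((h | rfl) | ⟨kv', h1, h2, h3⟩)
          · exact Or.inl h
          · exact Or.inr ⟨kv, List.mem_cons_self, rfl, hc⟩
          · exact Or.inr ⟨kv', List.mem_cons_of_mem _ h1, h2, h3⟩
        · rintro (h | ⟨kv', h1, h2, h3⟩)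
          · exact Or.inl (Or.inl h)
          · rcases List.mem_cons.mp h1 with rfl | h1
            · exact Or.inl (Or.inr h2.symm)
            · exact Or.inr ⟨kv', h1, h2, h3⟩

-- ===== VERDICT (by name: the statement is the Claim_ definition above) =====
set_option maxHeartbeats 1000000 in
theorem getDictMatchByItem_spec : Claim_equal_getDictMatchByItem := by
  intro c s _hdom
  unfold Spec_getDictMatchByItem getDictMatchByItem getDictMatchByItem_alt
  dsimp only
  set cd := PySem.Dict.ofList c with hcd
  set sd := PySem.Dict.ofList s with hsd
  set f2c := bIndex cd with hf2c
  set init := PySem.Dict.ofList (cd.keys.map (fun k => (k, ([] : List String)))) with hinit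
  set res := sd.items.foldl (bStep f2c) (init, ([] : List String)) with hres
  set M := aMatch cd sd with hM
  have ncd : cd.keys.Nodup := PySem.Dict.nodup_keys_ofList c
  have nsd : sd.keys.Nodup := PySem.Dict.nodup_keys_ofList s
  have hinit_items : init.items = cd.keys.map (fun k => (k, ([] : List String))) := by
    apply ofList_items_of_nodup
    simpa [List.map_map, Function.comp_def] using ncd
  have hinit_keys : init.keys = cd.keys := by
    simp only [PySem.Dict.keys, hinit_items, List.map_map]
    simp
  have hinit_getD : ∀ x, init.getD x ([] : List String) = [] := by
    intro x
    rw [PySem.Dict.getD_eq_get?_getD]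
    cases h : init.get? x with
    | none => rfl
    | some v =>
      have hmem := PySem.Dict.mem_items_of_get?_eq_some (d := init) (k := x) (v := v) h
      rw [hinit_items] at hmem
      rcases List.mem_map.mp hmem with ⟨k, _, hk⟩
      cases hk
      rfl
  have hf2cK : ∀ f x, x ∈ f2c.getD f [] → x ∈ cd.keys := by
    intro f x hx
    exact PySem.Dict.mem_keys_of_mem_items _ ((mem_bIndex cd f x).mp hx)
  obtain ⟨O1, O2, O3⟩ := outer_fold f2c cd hf2cK sd.items init [] hinit_keys
  rw [← hres] at O1 O2 O3
  have hMitems : M.items = cd.keys.map (fun k =>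
      (k, sd.keys.filter (fun sp => (sd.getD sp []).contains (cd.getD k "")))) := by
    apply ofList_items_of_nodup
    simpa [List.map_map, Function.comp_def] using ncd
  have hMkeys : M.keys = cd.keys := by
    simp only [PySem.Dict.keys, hMitems, List.map_map]
    simp
  have hcontains : ∀ k ∈ cd.keys, ∀ kv ∈ sd.items,
      decide (k ∈ kv.2.flatMap (fun f => f2c.getD f [])) = kv.2.contains (cd.getD k "") := by
    intro k hk kv hkv
    obtain ⟨v, hv⟩ : ∃ v, cd.get? k = some v := by
      cases h : cd.get? k with
      | none => exact absurd ((PySem.Dict.get?_eq_none_iff_not_mem_keys cd k).mp h) (by simp [hk])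
      | some v => exact ⟨v, rfl⟩
    have hgd : cd.getD k "" = v := by rw [PySem.Dict.getD_eq_get?_getD, hv]; rfl
    have hiff : (k ∈ kv.2.flatMap (fun f => f2c.getD f [])) ↔ v ∈ kv.2 := by
      rw [List.mem_flatMap]
      constructor
      · rintro ⟨f, hf, hkf⟩
        have h1 := (mem_bIndex cd f k).mp hkf
        have h2 := (PySem.Dict.get?_eq_some_iff_mem_items cd k f ncd).mpr h1
        rw [hv] at h2
        cases h2
        exact hf
      · intro hvk
        exact ⟨v, hvk, (mem_bIndex cd v k).mpr
          ((PySem.Dict.get?_eq_some_iff_mem_items cd k v ncd).mp hv)⟩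
    rw [hgd]
    simp [hiff]
  have hres1 : res.1 = M := by
    apply PySem.Dict.ext
    have hnk : res.1.keys.Nodup := by rw [O1, hinit_keys]; exact ncd
    have h1 := PySem.Dict.items_eq_map_keys res.1 hnk ([] : List String)
    rw [O1, hinit_keys] at h1
    rw [h1, hMitems]
    apply List.map_congr_left
    intro k hk
    simp only [Prod.mk.injEq, true_and]
    have hval : res.1.getD k [] = (sd.items.filter
        (fun kv => decide (k ∈ kv.2.flatMap (fun f => f2c.getD f [])))).map (·.1) := by
      rw [O2 k, hinit_getD k, List.nil_append]
    rw [hval]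
    have hkf : sd.keys.filter (fun sp => (sd.getD sp []).contains (cd.getD k "")) =
        (sd.items.filter (fun kv => (sd.getD kv.1 []).contains (cd.getD k ""))).map (·.1) := by
      simp only [PySem.Dict.keys]
      rw [List.filter_map]
      rfl
    rw [hkf]
    congr 1
    apply List.filter_congr
    intro kv hkv
    have hgkv : sd.getD kv.1 [] = kv.2 :=
      PySem.Dict.getD_of_mem_items sd (by simpa using hkv) nsd []
    rw [hgkv]
    exact hcontains k hk kv hkv
  have hus : sd.keys.filter (fun v => !((M.values.flatten).contains v)) =
      sd.keys.filter (fun sp => !(res.2.contains sp)) := by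
    apply List.filter_congr
    intro v _
    have hmemb : v ∈ M.values.flatten ↔ v ∈ res.2 := by
      rw [O3 v]
      simp only [List.not_mem_nil, false_or]
      have hvals : M.values = cd.keys.map (fun k =>
          sd.keys.filter (fun sp => (sd.getD sp []).contains (cd.getD k ""))) := by
        simp only [PySem.Dict.values, hMitems, List.map_map]
        rfl
      rw [hvals, List.mem_flatten]
      constructor
      · rintro ⟨l, hl, hvl⟩
        rcases List.mem_map.mp hl with ⟨k, hk, rfl⟩
        rcases List.mem_filter.mp hvl with ⟨hvkeys, hcont⟩
        obtain ⟨lv, hlv⟩ : ∃ lv, sd.get? v = some lv := by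
          cases h : sd.get? v with
          | none => exact absurd ((PySem.Dict.get?_eq_none_iff_not_mem_keys sd v).mp h) (by simp [hvkeys])
          | some lv => exact ⟨lv, rfl⟩
        have hitems : (v, lv) ∈ sd.items := (PySem.Dict.get?_eq_some_iff_mem_items sd v lv nsd).mp hlv
        have hgdv : sd.getD v [] = lv := by rw [PySem.Dict.getD_eq_get?_getD, hlv]; rfl
        obtain ⟨w, hw⟩ : ∃ w, cd.get? k = some w := by
          cases h : cd.get? k with
          | none => exact absurd ((PySem.Dict.get?_eq_none_iff_not_mem_keys cd k).mp h) (by simp [hk])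
          | some w => exact ⟨w, rfl⟩
        have hgdk : cd.getD k "" = w := by rw [PySem.Dict.getD_eq_get?_getD, hw]; rfl
        have hwlv : w ∈ lv := by
          rw [hgdv, hgdk] at hcont
          exact List.contains_iff_mem.mp hcont
        refine ⟨(v, lv), hitems, rfl, ?_⟩
        apply List.ne_nil_of_mem (a := k)
        exact List.mem_flatMap.mpr ⟨w, hwlv, (mem_bIndex cd w k).mpr
          ((PySem.Dict.get?_eq_some_iff_mem_items cd k w ncd).mp hw)⟩
      · rintro ⟨kv, hkv, rfl, hne⟩
        rcases List.exists_mem_of_ne_nil _ hne with ⟨ch, hch⟩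
        rcases List.mem_flatMap.mp hch with ⟨f, hf, hchf⟩
        have hchitems : (ch, f) ∈ cd.items := (mem_bIndex cd f ch).mp hchf
        have hchkeys : ch ∈ cd.keys := PySem.Dict.mem_keys_of_mem_items _ hchitems
        have hgdch : cd.getD ch "" = f := PySem.Dict.getD_of_mem_items cd hchitems ncd ""
        have hvkeys : kv.1 ∈ sd.keys := PySem.Dict.mem_keys_of_mem_items _ hkv
        have hgdv : sd.getD kv.1 [] = kv.2 :=
          PySem.Dict.getD_of_mem_items sd (by simpa using hkv) nsd []
        refine ⟨_, List.mem_map.mpr ⟨ch, hchkeys, rfl⟩, ?_⟩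
        refine List.mem_filter.mpr ⟨hvkeys, ?_⟩
        rw [hgdv, hgdch]
        exact List.contains_iff_mem.mpr hf
    simp [hmemb]
  have hfold2 : M.items.foldl (fun d kv => d.insert (kv.2.headD "") [kv.1]) PySem.Dict.empty =
      M.keys.foldl (fun d k => d.insert ((M.getD k []).headD "") [k]) PySem.Dict.empty := by
    rw [PySem.Dict.items_eq_map_keys M (by rw [hMkeys]; exact ncd) ([] : List String),
      List.foldl_map]
  rw [hres1, ← hus, hfold2]
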